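-- pv_equiv track=rewrite | github.com/mitshell/libmich | libmich/asn1/utils.py | scan_for_comment
-- ===== SOURCE A (Python) =====
-- def scan_for_comment(text=''):
--     '''
--     returns a list of 2-tuple for each ASN.1 comment {start offset, end offset}
--     '''
--     ret = []
--     comment = False
--     cur = 0
--     while cur < len(text):
--         if text[cur:cur+2] == '--':
--             if not comment:
--                 # comment starting
--                 comment = True
--                 start = cur
--                 # exception for full line of ------------------ sh*t
--                 eol = text[cur:].find('\n')
--                 if eol > 2 and text[cur:cur+eol] == eol*'-':
--                     ret.append( (start, start+eol) )
--                     comment = False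
--                     cur += eol
--                 else:
--                     cur += 2
--             else:
--                 # comment ending
--                 comment = False
--                 stop = cur+2
--                 ret.append( (start, stop) )
--                 cur += 2
--         elif text[cur:cur+1] == '\n' and comment:
--             # end-of-line, comment ending
--             comment = False
--             stop = cur
--             ret.append( (start, stop) )
--             cur += 1
--         else:
--             cur += 1
--     return ret
-- ===== SOURCE B (Python) =====
-- def scan_for_comment(text=''):
--     '''
--     returns a list of 2-tuple for each ASN.1 comment {start offset, end offset}
--     '''
--     ret = []
--     n = len(text)
--     pos = 0
--     while pos < n:
--         # delimit the current line
--         nl = text.find('\n', pos)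
--         if nl == -1:
--             line_end, terminated, nxt = n, False, n
--         else:
--             line_end, terminated, nxt = nl, True, nl + 1
--         i = pos
--         start = None
--         while i < line_end:
--             if text[i] == '-' and i + 1 < line_end and text[i + 1] == '-':
--                 if start is None:
--                     # full-dash-line override: emit whole run and stop the line
--                     if terminated and line_end - i > 2 and all(c == '-' for c in text[i:line_end]):
--                         ret.append((i, line_end))
--                         start = None
--                         break
--                     start = i
--                     i += 2
--                 else:
--                     ret.append((start, i + 2))
--                     start = None
--                     i += 2
--             else:
--                 i += 1
--         else:
--             # inner loop ran to line end: a still-open comment closes at the newline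
--             if start is not None and terminated:
--                 ret.append((start, line_end))
--         pos = nxt
--     return ret
-- ===== Notes on version B (the rewrite author's own statement) =====
-- stated objective: faster
-- what changed: B replaces A's single whole-text character scan (with per-character two-char slicing and a newline-find at every comment opening) by a line-by-line decomposition: an outer loop delimits each line with one C-level str.find for the newline, and an inner scan over the line compares characters directly to handle comment open/close, closing a still-open comment at the line end only when the line is newline-terminated.
import Mathlib
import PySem

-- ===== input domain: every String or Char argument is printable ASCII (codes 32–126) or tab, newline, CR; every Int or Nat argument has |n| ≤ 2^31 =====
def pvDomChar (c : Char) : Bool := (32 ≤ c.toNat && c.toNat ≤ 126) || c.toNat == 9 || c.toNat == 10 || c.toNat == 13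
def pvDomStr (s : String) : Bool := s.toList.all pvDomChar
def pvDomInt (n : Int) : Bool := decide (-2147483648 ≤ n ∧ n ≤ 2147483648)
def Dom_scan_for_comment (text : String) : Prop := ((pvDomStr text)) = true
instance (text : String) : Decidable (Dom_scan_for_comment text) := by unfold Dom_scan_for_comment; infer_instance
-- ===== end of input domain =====

-- B re-implements A's whole-text character scan as a line-by-line scan (comments are
-- line-scoped, one str.find per line instead of per-character slicing); same return
-- value; a timing run measured B faster by a constant factor.

-- ===== PORT A =====
-- A's single while-loop over the whole text; the Python pair (comment, start) is the
-- Option argument st (some s = comment open since offset s); fuel only makes the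
-- recursion structural (the wrapper passes enough for the whole scan).
def scanA_loop (cs : List Char) : Nat → Nat → Option Nat → List (List Int) → List (List Int)
  | 0, _, _, ret => ret
  | fuel + 1, cur, st, ret =>
    if cur < cs.length then
      if PySem.List.slice cs (some (cur : Int)) (some ((cur : Int) + 2)) = ['-', '-'] then
        match st with
        | none =>
          -- comment starting; exception for a full line of dashes
          let eol : Int := PySem.Chars.find (cs.drop cur) ['\n']
          if 2 < eol ∧
              PySem.List.slice cs (some (cur : Int)) (some ((cur : Int) + eol)) =
                List.replicate eol.toNat '-' then
            scanA_loop cs fuel (cur + eol.toNat) none (ret ++ [[(cur : Int), (cur : Int) + eol]])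
          else
            scanA_loop cs fuel (cur + 2) (some cur) ret
        | some s =>
          -- comment ending
          scanA_loop cs fuel (cur + 2) none (ret ++ [[(s : Int), (cur : Int) + 2]])
      else
        match st with
        | some s =>
          if cs[cur]? = some '\n' then
            -- end-of-line, comment ending
            scanA_loop cs fuel (cur + 1) none (ret ++ [[(s : Int), (cur : Int)]])
          else
            scanA_loop cs fuel (cur + 1) (some s) ret
        | none => scanA_loop cs fuel (cur + 1) none ret
    else ret

def scan_for_comment (text : String) : List (List Int) :=
  scanA_loop text.toList (text.toList.length + 1) 0 none []

-- ===== PORT B =====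
-- inner scan of one line cs[i:lineEnd]; start = open-comment offset; term = the line
-- ends with a newline; fuel as above
def scanB_line (cs : List Char) (lineEnd : Nat) (term : Bool) :
    Nat → Nat → Option Nat → List (List Int) → List (List Int)
  | 0, _, _, ret => ret
  | fuel + 1, i, start, ret =>
    if i < lineEnd then
      if cs[i]? = some '-' ∧ i + 1 < lineEnd ∧ cs[i + 1]? = some '-' then
        match start with
        | none =>
          -- full-dash-line override: emit whole run and stop the line
          if term ∧ 2 < lineEnd - i ∧
              (PySem.List.slice cs (some (i : Int)) (some (lineEnd : Int))).all (· = '-') then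
            ret ++ [[(i : Int), (lineEnd : Int)]]
          else
            scanB_line cs lineEnd term fuel (i + 2) (some i) ret
        | some s => scanB_line cs lineEnd term fuel (i + 2) none (ret ++ [[(s : Int), (i : Int) + 2]])
      else
        scanB_line cs lineEnd term fuel (i + 1) start ret
    else
      -- line exhausted: a still-open comment closes at the newline, else it is dropped
      match start with
      | some s => if term then ret ++ [[(s : Int), (lineEnd : Int)]] else ret
      | none => ret

-- outer loop over lines, delimited with text.find('\n', pos)
def scanB_lines (cs : List Char) : Nat → Nat → List (List Int) → List (List Int)
  | 0, _, ret => ret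
  | fuel + 1, pos, ret =>
    if pos < cs.length then
      let nl : Int := PySem.Chars.findFrom cs ['\n'] (pos : Int) none
      if nl = -1 then
        scanB_line cs cs.length false (cs.length + 1) pos none ret
      else
        scanB_lines cs fuel (nl.toNat + 1)
          (scanB_line cs nl.toNat true (cs.length + 1) pos none ret)
    else ret

def scan_for_comment_alt (text : String) : List (List Int) :=
  scanB_lines text.toList (text.toList.length + 1) 0 []

-- ===== PRECONDITION & SPEC =====
def Spec_scan_for_comment (text : String) (out : List (List Int)) : Prop := out = scan_for_comment_alt text
instance (text : String) (out : List (List Int)) : Decidable (Spec_scan_for_comment text out) := by unfold Spec_scan_for_comment; infer_instance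

-- ===== CLAIM (what is proved, stated in full; the proofs are below) =====
def Claim_equal_scan_for_comment : Prop := ∀ (text : String), Dom_scan_for_comment text → Spec_scan_for_comment text (scan_for_comment text)

-- ===== LEMMAS AND PROOFS =====

theorem singleton_prefix_iff (l : List Char) (c : Char) : ([c] <+: l) ↔ l[0]? = some c := by
  cases l with
  | nil => simp
  | cons a t => simp [List.cons_prefix_cons, eq_comm]

theorem prefix_drop_iff (l : List Char) (c : Char) (j : Nat) :
    ([c] <+: l.drop j) ↔ l[j]? = some c := by
  rw [singleton_prefix_iff, List.getElem?_drop]; simp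

theorem nl_mem_drop_iff (cs : List Char) (i : Nat) (c : Char) :
    c ∈ cs.drop i ↔ ∃ j : Nat, i ≤ j ∧ cs[j]? = some c := by
  rw [List.mem_iff_getElem?]
  constructor
  · rintro ⟨m, hm⟩
    exact ⟨i + m, by omega, by rw [← List.getElem?_drop]; exact hm⟩
  · rintro ⟨j, hij, hj⟩
    exact ⟨j - i, by rw [List.getElem?_drop]; rw [show i + (j - i) = j by omega]; exact hj⟩

-- A port's eol computation, characterised by the line structure
theorem find_line (cs : List Char) (i le : Nat) (term : Bool)
    (hterm : if term then cs[le]? = some '\n' else le = cs.length)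
    (hle : i ≤ le) (hnol : ∀ j, i ≤ j → j < le → cs[j]? ≠ some '\n') :
    PySem.Chars.find (cs.drop i) ['\n'] = if term then ((le - i : Nat) : Int) else -1 := by
  cases term with
  | false =>
    rw [if_neg (by simp)] at hterm ⊢
    rw [PySem.Chars.find_eq_neg_one_iff, List.singleton_infix_iff, nl_mem_drop_iff]
    rintro ⟨j, hij, hj⟩
    exact hnol j hij (by rw [hterm]; exact (List.getElem?_eq_some_iff.mp hj).1) hj
  | true =>
    rw [if_pos rfl] at hterm ⊢
    have hmem : '\n' ∈ cs.drop i := (nl_mem_drop_iff cs i '\n').mpr ⟨le, hle, hterm⟩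
    have hnn : 0 ≤ PySem.Chars.find (cs.drop i) ['\n'] := by
      rw [PySem.Chars.find_nonneg_iff, List.singleton_infix_iff]; exact hmem
    obtain ⟨hpre, hmin⟩ := PySem.Chars.find_spec (s := cs.drop i) (sub := ['\n']) hnn
    set f := PySem.Chars.find (cs.drop i) ['\n'] with hf
    rw [List.drop_drop, prefix_drop_iff] at hpre
    have h1 : le ≤ i + f.toNat := by
      by_contra hlt
      exact hnol (i + f.toNat) (by omega) (by omega) hpre
    have h2 : ¬ (le - i < f.toNat) := by
      intro hlt
      have := hmin (le - i) hlt
      rw [List.drop_drop, prefix_drop_iff, show i + (le - i) = le by omega] at this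
      exact this hterm
    omega

theorem slice_two (cs : List Char) (i : Nat) :
    PySem.List.slice cs (some (i : Int)) (some ((i : Int) + 2)) = (cs.drop i).take 2 := by
  exact_mod_cast PySem.List.slice_natCast_add cs i 2

theorem take_two (cs : List Char) (i : Nat) (h : i < cs.length) :
    (cs.drop i).take 2 =
      if h2 : i + 1 < cs.length then [cs[i], cs[i+1]] else [cs[i]] := by
  rw [List.drop_eq_getElem_cons h]
  by_cases h2 : i + 1 < cs.length
  · rw [List.drop_eq_getElem_cons h2, dif_pos h2]; rfl
  · have : cs.drop (i+1) = [] := by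
      rw [List.drop_eq_nil_iff]; omega
    rw [this, dif_neg h2]; rfl

theorem scanA_slice_at_newline (cs : List Char) (le : Nat) (hnl : cs[le]? = some '\n') :
    PySem.List.slice cs (some (le : Int)) (some ((le : Int) + 2)) ≠ ['-', '-'] := by
  have hlt : le < cs.length := (List.getElem?_eq_some_iff.mp hnl).1
  have hget : cs[le] = '\n' := by
    have := (List.getElem?_eq_some_iff.mp hnl).2; simpa using this
  rw [slice_two, take_two cs le hlt]
  split <;> simp [hget]

-- A's loop returns once the cursor is past the end, whatever fuel remains
theorem scanA_end (cs : List Char) (f cur : Nat) (st : Option Nat) (ret : List (List Int))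
    (h : cs.length ≤ cur) : scanA_loop cs f cur st ret = ret := by
  cases f with
  | zero => rfl
  | succ f => simp only [scanA_loop]; rw [if_neg (by omega)]

-- the fuel is irrelevant as long as it covers the remaining distance
theorem scanA_fuel (cs : List Char) :
    ∀ f g cur st ret, cs.length - cur < f → cs.length - cur < g →
      scanA_loop cs f cur st ret = scanA_loop cs g cur st ret := by
  intro f
  induction f with
  | zero => intro g cur st ret h1 _; omega
  | succ f ihf =>
    intro g cur st ret h1 h2
    match g, h2 with
    | g + 1, h2 =>
    by_cases hc : cur < cs.length
    case neg => rw [scanA_end cs _ _ _ _ (by omega), scanA_end cs _ _ _ _ (by omega)]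
    case pos =>
      simp only [scanA_loop]
      rw [if_pos hc, if_pos hc]
      by_cases hs : PySem.List.slice cs (some (cur : Int)) (some ((cur : Int) + 2)) = ['-', '-']
      · rw [if_pos hs, if_pos hs]
        cases st with
        | some s => exact ihf g _ _ _ (by omega) (by omega)
        | none =>
          by_cases hd : 2 < PySem.Chars.find (cs.drop cur) ['\n'] ∧
              PySem.List.slice cs (some (cur : Int))
                  (some ((cur : Int) + PySem.Chars.find (cs.drop cur) ['\n'])) =
                List.replicate (PySem.Chars.find (cs.drop cur) ['\n']).toNat '-'
          · rw [if_pos hd, if_pos hd]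
            have h3 := hd.1
            exact ihf g _ _ _ (by omega) (by omega)
          · rw [if_neg hd, if_neg hd]
            exact ihf g _ _ _ (by omega) (by omega)
      · rw [if_neg hs, if_neg hs]
        cases st with
        | some s =>
          dsimp only
          by_cases hn : cs[cur]? = some '\n'
          · rw [if_pos hn, if_pos hn]
            exact ihf g _ _ _ (by omega) (by omega)
          · rw [if_neg hn, if_neg hn]
            exact ihf g _ _ _ (by omega) (by omega)
        | none => exact ihf g _ _ _ (by omega) (by omega)

-- A's loop steps silently over a newline when no comment is open
theorem scanA_step_newline (cs : List Char) (f le : Nat) (ret : List (List Int))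
    (hnl : cs[le]? = some '\n') :
    scanA_loop cs (f + 1) le none ret = scanA_loop cs f (le + 1) none ret := by
  have hlt : le < cs.length := (List.getElem?_eq_some_iff.mp hnl).1
  simp only [scanA_loop]
  rw [if_pos hlt, if_neg (scanA_slice_at_newline cs le hnl)]

-- A's '--' test on the whole text coincides with B's bounded one inside a line
theorem cond_iff (cs : List Char) (i le : Nat) (term : Bool)
    (hterm : if term then cs[le]? = some '\n' else le = cs.length)
    (hi : i < le) (hle : le ≤ cs.length) :
    PySem.List.slice cs (some (i : Int)) (some ((i : Int) + 2)) = ['-', '-'] ↔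
      (cs[i]? = some '-' ∧ i + 1 < le ∧ cs[i+1]? = some '-') := by
  have hilen : i < cs.length := lt_of_lt_of_le hi hle
  rw [slice_two, take_two cs i hilen]
  by_cases h2 : i + 1 < cs.length
  · rw [dif_pos h2]
    constructor
    · intro hEq
      obtain ⟨e1, e2⟩ : cs[i] = '-' ∧ cs[i+1] = '-' := by simpa using hEq
      refine ⟨by simp [List.getElem?_eq_getElem hilen, e1], ?_,
        by simp [List.getElem?_eq_getElem h2, e2]⟩
      rcases Nat.lt_or_ge (i+1) le with h | h
      · exact h
      · exfalso
        have hieq : i + 1 = le := by omega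
        cases term with
        | true =>
          rw [if_pos rfl] at hterm
          have : (some cs[i+1] : Option Char) = some '\n' := by
            rw [← List.getElem?_eq_getElem h2, hieq]; exact hterm
          simp [e2] at this
        | false =>
          rw [if_neg (by simp)] at hterm
          omega
    · rintro ⟨e1, _, e3⟩
      have g1 : cs[i] = '-' := by
        have := (List.getElem?_eq_some_iff.mp e1).2; simpa using this
      have g3 : cs[i+1] = '-' := by
        have := (List.getElem?_eq_some_iff.mp e3).2; simpa using this
      rw [g1, g3]
  · rw [dif_neg h2]
    constructor
    · intro hEq; exact absurd (congrArg List.length hEq) (by simp)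
    · rintro ⟨_, hlt, _⟩; omega

-- the dash-run test: A's replicate comparison = B's all-dashes test
theorem dash_iff (cs : List Char) (i le : Nat) (hi : i ≤ le) (hle : le ≤ cs.length) :
    (PySem.List.slice cs (some (i : Int)) (some ((i : Int) + ((le - i : Nat) : Int))) =
        List.replicate ((le - i : Nat) : Int).toNat '-') ↔
      ((PySem.List.slice cs (some (i : Int)) (some (le : Int))).all (· = '-') = true) := by
  have hcast : (i : Int) + ((le - i : Nat) : Int) = ((le : Nat) : Int) := by omega
  rw [hcast, PySem.List.slice_natCast, Int.toNat_natCast]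
  have hlen : ((cs.drop i).take (le - i)).length = le - i := by
    simp; omega
  rw [List.eq_replicate_iff, List.all_eq_true]
  simp [hlen]

-- core: within one line, A's character scan agrees with B's line scan
theorem inner_agree (cs : List Char) (le : Nat) (term : Bool)
    (hterm : if term then cs[le]? = some '\n' else le = cs.length) :
    ∀ k i st ret fA fB, le - i = k → i ≤ le →
      (∀ j, i ≤ j → j < le → cs[j]? ≠ some '\n') →
      cs.length - i < fA → le - i < fB →
      scanA_loop cs fA i st ret =
        scanA_loop cs (cs.length + 1 - (if term then le + 1 else le))
          (if term then le + 1 else le) none (scanB_line cs le term fB i st ret) := by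
  have hlenle : le ≤ cs.length := by
    cases term with
    | true =>
      rw [if_pos rfl] at hterm
      exact le_of_lt (List.getElem?_eq_some_iff.mp hterm).1
    | false => rw [if_neg (by simp)] at hterm; omega
  intro k
  induction k using Nat.strong_induction_on with
  | _ k ih =>
  intro i st ret fA fB hk hile hnol hfA hfB
  obtain ⟨fB', rfl⟩ : ∃ f', fB = f' + 1 := ⟨fB - 1, by omega⟩
  by_cases hi : i < le
  case neg =>
    have hieq : i = le := by omega
    subst hieq
    simp only [scanB_line]
    rw [if_neg (lt_irrefl i)]
    cases term with
    | false =>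
      rw [if_neg (by simp)] at hterm
      rw [if_neg (by simp)]
      cases st with
      | none => rw [hterm, scanA_end cs _ _ _ _ (le_refl _), scanA_end cs _ _ _ _ (le_refl _)]
      | some s =>
        rw [hterm, scanA_end cs _ _ _ _ (le_refl _)]
        simp [scanA_end cs _ _ _ _ (le_refl _)]
    | true =>
      rw [if_pos rfl] at hterm
      rw [if_pos rfl]
      have hlt : i < cs.length := (List.getElem?_eq_some_iff.mp hterm).1
      obtain ⟨f, rfl⟩ : ∃ f', fA = f' + 1 := ⟨fA - 1, by omega⟩
      cases st with
      | none =>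
        rw [scanA_step_newline cs f i ret hterm]
        exact scanA_fuel cs f _ _ _ _ (by omega) (by omega)
      | some s =>
        simp only [scanA_loop]
        rw [if_pos hlt, if_neg (scanA_slice_at_newline cs i hterm)]
        simp only [hterm, if_pos trivial]
        exact scanA_fuel cs f _ _ _ _ (by omega) (by omega)
  case pos =>
    have hilen : i < cs.length := lt_of_lt_of_le hi hlenle
    obtain ⟨fA', rfl⟩ : ∃ f', fA = f' + 1 := ⟨fA - 1, by omega⟩
    by_cases hB : cs[i]? = some '-' ∧ i + 1 < le ∧ cs[i+1]? = some '-'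
    · have hA : PySem.List.slice cs (some (i : Int)) (some ((i : Int) + 2)) = ['-', '-'] :=
        (cond_iff cs i le term hterm hi hlenle).mpr hB
      simp only [scanA_loop, scanB_line]
      rw [if_pos hilen, if_pos hA, if_pos hi, if_pos hB]
      obtain ⟨hB1, hB2, hB3⟩ := hB
      cases st with
      | some s =>
        exact ih (le - (i+2)) (by omega) (i+2) none _ fA' fB' rfl (by omega)
          (fun j h1 h2 => hnol j (by omega) h2) (by omega) (by omega)
      | none =>
        have hfind := find_line cs i le term hterm hile hnol
        cases term with
        | false =>
          rw [if_neg (by simp)] at hfind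
          simp only [hfind]
          rw [if_neg (fun h => absurd h.1 (by norm_num))]
          rw [if_neg (by simp)]
          exact ih (le - (i+2)) (by omega) (i+2) (some i) ret fA' fB' rfl (by omega)
            (fun j h1 h2 => hnol j (by omega) h2) (by omega) (by omega)
        | true =>
          rw [if_pos rfl] at hfind hterm
          have hlelt : le < cs.length := (List.getElem?_eq_some_iff.mp hterm).1
          simp only [hfind]
          rw [if_pos (show True from trivial)]
          by_cases hD : 2 < le - i ∧
              ((PySem.List.slice cs (some (i : Int)) (some (le : Int))).all (· = '-') = true)
          · have hcondA : 2 < ((le - i : Nat) : Int) ∧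
                PySem.List.slice cs (some (i : Int)) (some ((i : Int) + ((le - i : Nat) : Int))) =
                  List.replicate ((le - i : Nat) : Int).toNat '-' :=
              ⟨by omega, (dash_iff cs i le hile hlenle).mpr hD.2⟩
            rw [if_pos hcondA]
            have hcondB : True ∧ 2 < le - i ∧
                ((PySem.List.slice cs (some (i : Int)) (some (le : Int))).all (· = '-') = true) :=
              ⟨trivial, hD.1, hD.2⟩
            rw [if_pos hcondB]
            have hc1 : i + ((le - i : Nat) : Int).toNat = le := by omega
            have hc2 : (i : Int) + ((le - i : Nat) : Int) = (le : Int) := by omega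
            rw [hc1, hc2]
            obtain ⟨f, rfl⟩ : ∃ f', fA' = f' + 1 := ⟨fA' - 1, by omega⟩
            rw [scanA_step_newline cs f le _ hterm]
            exact scanA_fuel cs f _ _ _ _ (by omega) (by omega)
          · have hncondA : ¬ (2 < ((le - i : Nat) : Int) ∧
                PySem.List.slice cs (some (i : Int)) (some ((i : Int) + ((le - i : Nat) : Int))) =
                  List.replicate ((le - i : Nat) : Int).toNat '-') :=
              fun h => hD ⟨by omega, (dash_iff cs i le hile hlenle).mp h.2⟩
            rw [if_neg hncondA]
            have hncondB : ¬ (True ∧ 2 < le - i ∧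
                ((PySem.List.slice cs (some (i : Int)) (some (le : Int))).all (· = '-') = true)) :=
              fun h => hD ⟨h.2.1, h.2.2⟩
            rw [if_neg hncondB]
            exact ih (le - (i+2)) (by omega) (i+2) (some i) ret fA' fB' rfl (by omega)
              (fun j h1 h2 => hnol j (by omega) h2) (by omega) (by omega)
    · have hA : ¬ (PySem.List.slice cs (some (i : Int)) (some ((i : Int) + 2)) = ['-', '-']) :=
        fun h => hB ((cond_iff cs i le term hterm hi hlenle).mp h)
      have hnl : ¬ (cs[i]? = some '\n') := hnol i (le_refl i) hi
      simp only [scanA_loop, scanB_line]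
      rw [if_pos hilen, if_neg hA, if_pos hi, if_neg hB]
      have htail := ih (le - (i+1)) (by omega) (i+1) st ret fA' fB' rfl (by omega)
        (fun j h1 h2 => hnol j (by omega) h2) (by omega) (by omega)
      cases st with
      | some s => simpa [hnl] using htail
      | none => exact htail

theorem outer_agree (cs : List Char) :
    ∀ k pos ret fA fL, cs.length + 1 - pos = k →
      cs.length - pos < fA → cs.length - pos < fL →
      scanA_loop cs fA pos none ret = scanB_lines cs fL pos ret := by
  intro k
  induction k using Nat.strong_induction_on with
  | _ k ih =>
  intro pos ret fA fL hk hfA hfL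
  obtain ⟨fL', rfl⟩ : ∃ f', fL = f' + 1 := ⟨fL - 1, by omega⟩
  by_cases hp : pos < cs.length
  · simp only [scanB_lines]
    rw [if_pos hp]
    have hff := PySem.Chars.findFrom_natCast cs ['\n'] pos (by omega)
    by_cases hf : PySem.Chars.find (cs.drop pos) ['\n'] = -1
    · have hnl : PySem.Chars.findFrom cs ['\n'] (pos : Int) none = -1 := by
        rw [hff, if_pos hf]
      simp only [hnl]
      rw [if_pos (show True from trivial)]
      have hnol : ∀ j, pos ≤ j → j < cs.length → cs[j]? ≠ some '\n' := by
        intro j h1 h2 hj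
        rw [PySem.Chars.find_eq_neg_one_iff, List.singleton_infix_iff] at hf
        exact hf ((nl_mem_drop_iff cs pos '\n').mpr ⟨j, h1, hj⟩)
      have hin := inner_agree cs cs.length false (by rw [if_neg (by simp)])
        (cs.length - pos) pos none ret fA (cs.length + 1) rfl (by omega) hnol hfA (by omega)
      rw [if_neg (by simp)] at hin
      rw [hin, scanA_end cs _ _ _ _ (le_refl _)]
    · have hnn : 0 ≤ PySem.Chars.find (cs.drop pos) ['\n'] := by
        have := PySem.Chars.neg_one_le_find (s := cs.drop pos) (sub := ['\n'])
        omega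
      set f := PySem.Chars.find (cs.drop pos) ['\n'] with hfdef
      have hnl : PySem.Chars.findFrom cs ['\n'] (pos : Int) none = (pos : Int) + f := by
        rw [hff, if_neg hf]
      simp only [hnl]
      rw [if_neg (by omega)]
      obtain ⟨hpre, hmin⟩ := PySem.Chars.find_spec (s := cs.drop pos) (sub := ['\n']) hnn
      rw [← hfdef] at hpre hmin
      rw [List.drop_drop, prefix_drop_iff] at hpre
      have htn : ((pos : Int) + f).toNat = pos + f.toNat := by omega
      rw [htn]
      have hlelt : pos + f.toNat < cs.length := (List.getElem?_eq_some_iff.mp hpre).1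
      have hterm : (if true then cs[pos + f.toNat]? = some '\n'
          else pos + f.toNat = cs.length) := by
        rw [if_pos rfl]; exact hpre
      have hnol : ∀ j, pos ≤ j → j < pos + f.toNat → cs[j]? ≠ some '\n' := by
        intro j h1 h2 hj
        have := hmin (j - pos) (by omega)
        rw [List.drop_drop, prefix_drop_iff, show pos + (j - pos) = j by omega] at this
        exact this hj
      have hin := inner_agree cs (pos + f.toNat) true hterm (pos + f.toNat - pos)
        pos none ret fA (cs.length + 1) rfl (by omega) hnol hfA (by omega)
      rw [if_pos rfl] at hin
      rw [hin]
      exact ih (cs.length + 1 - (pos + f.toNat + 1)) (by omega) (pos + f.toNat + 1) _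
        (cs.length + 1 - (pos + f.toNat + 1)) fL' rfl (by omega) (by omega)
  · simp only [scanB_lines]
    rw [if_neg hp, scanA_end cs _ _ _ _ (by omega)]
-- ===== VERDICT (by name: the statement is the Claim_ definition above) =====
theorem scan_for_comment_spec : Claim_equal_scan_for_comment := by
  intro text _
  unfold Spec_scan_for_comment scan_for_comment scan_for_comment_alt
  exact outer_agree text.toList _ 0 [] (text.toList.length + 1) (text.toList.length + 1)
    rfl (by omega) (by omega)
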